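-- pv_equiv track=rewrite | github.com/SouraDutta/IITJ_AI_MTech_NLP_Projects | Relation Pred/test.py | is_EPO
-- ===== SOURCE A (Python) =====
-- def is_EPO(triples):
--     entity_pairs = set()
--     for e in triples:
--         e_pair = (e[0], e[1])
--         entity_pairs.add(e_pair)
--     if len(entity_pairs) != len(triples):
--         return True
--     return False
-- ===== SOURCE B (Python) =====
-- def is_EPO(triples):
--     # Brute-force pairwise check: pop the front pair and scan the rest for it.
--     # No set at all; O(n^2) worst case, but exits at the first duplicate found.
--     pairs = [(e[0], e[1]) for e in triples]
--     while pairs: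
--         head = pairs.pop(0)
--         if head in pairs:
--             return True
--     return False
-- ===== Notes on version B (the rewrite author's own statement) =====
-- stated objective: alternative
-- what changed: B drops the hash set entirely: it materialises the (head, tail) pairs as a list and does a brute-force pairwise scan (pop the front pair, look for it in the remainder), returning True at the first duplicate, instead of building a set of all pairs and comparing its size to len(triples).
import Mathlib
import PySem

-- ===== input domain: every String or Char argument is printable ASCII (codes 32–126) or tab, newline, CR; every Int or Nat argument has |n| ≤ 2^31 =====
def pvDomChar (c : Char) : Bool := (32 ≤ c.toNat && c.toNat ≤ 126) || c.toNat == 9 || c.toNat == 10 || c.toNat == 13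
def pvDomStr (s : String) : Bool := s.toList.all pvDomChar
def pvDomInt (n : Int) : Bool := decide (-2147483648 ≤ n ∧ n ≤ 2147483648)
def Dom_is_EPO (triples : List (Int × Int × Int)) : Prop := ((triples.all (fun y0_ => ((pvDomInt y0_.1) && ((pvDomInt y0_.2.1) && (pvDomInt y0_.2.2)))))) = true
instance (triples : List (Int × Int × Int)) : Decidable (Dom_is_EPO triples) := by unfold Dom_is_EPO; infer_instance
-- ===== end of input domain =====

-- B (alternative): no set at all — a brute-force pairwise scan over the list of pairs
-- (pop the front pair, look for it in the remainder), instead of A's build-a-set-then-compare-sizes.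

-- ===== PORT A =====
-- literal port of A: build the set of (e[0], e[1]) pairs, then compare sizes
def is_EPO (triples : List (Int × Int × Int)) : Bool :=
  let entity_pairs : PySem.Set (Int × Int) :=
    triples.foldl (fun s e => PySem.Set.add s (e.1, e.2.1)) PySem.Set.empty
  if PySem.Set.len entity_pairs ≠ (triples.length : Int) then true else false

-- ===== PORT B =====
-- the while loop of Source B: pop the front pair; if it occurs in the remainder, True
def epoScan : List (Int × Int) → Bool
  | [] => false
  | head :: rest => if rest.contains head then true else epoScan rest

def is_EPO_alt (triples : List (Int × Int × Int)) : Bool :=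
  epoScan (triples.map (fun e => (e.1, e.2.1)))

-- ===== PRECONDITION & SPEC =====
def Spec_is_EPO (triples : List (Int × Int × Int)) (out : Bool) : Prop := out = is_EPO_alt triples
instance (triples : List (Int × Int × Int)) (out : Bool) : Decidable (Spec_is_EPO triples out) := by unfold Spec_is_EPO; infer_instance

-- ===== CLAIM (what is proved, stated in full; the proofs are below) =====
def Claim_equal_is_EPO : Prop := ∀ (triples : List (Int × Int × Int)), Dom_is_EPO triples → Spec_is_EPO triples (is_EPO triples)

-- ===== LEMMAS AND PROOFS =====

-- B's scan finds a duplicate iff the pair list is not duplicate-free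
theorem epoScan_eq (l : List (Int × Int)) : epoScan l = decide (¬ l.Nodup) := by
  induction l with
  | nil => simp [epoScan]
  | cons h t ih =>
    simp only [epoScan, ih, List.nodup_cons]
    by_cases hm : h ∈ t
    · simp [hm]
    · simp [hm]

-- upper bound: each add step grows the set by at most one
theorem length_foldl_add_le (l : List (Int × Int)) (s : PySem.Set (Int × Int)) :
    (l.foldl (fun s x => PySem.Set.add s x) s).length ≤ s.length + l.length := by
  induction l generalizing s with
  | nil => simp
  | cons a b ih =>
    simp only [List.foldl, List.length_cons]
    have h1 : (PySem.Set.add s a).length ≤ s.length + 1 := by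
      simp [PySem.Set.add]; split <;> simp
    have h2 := ih (PySem.Set.add s a)
    omega

-- the foldl in A adds every element exactly once iff the list is duplicate-free and disjoint from s
theorem foldl_add_length (l : List (Int × Int)) (s : PySem.Set (Int × Int)) :
    (l.foldl (fun s x => PySem.Set.add s x) s).length = s.length + l.length
      ↔ (l.Nodup ∧ ∀ x ∈ l, x ∉ s) := by
  induction l generalizing s with
  | nil => simp
  | cons h t ih =>
    simp only [List.foldl]
    by_cases hm : h ∈ s
    · have hadd : PySem.Set.add s h = s := by
        simp [PySem.Set.add, hm]
      rw [hadd]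
      constructor
      · intro hlen
        exfalso
        have hle := length_foldl_add_le t s
        simp only [List.length_cons] at hlen; omega
      · rintro ⟨-, hd⟩
        exact absurd hm (hd h (by simp))
    · have hadd : (PySem.Set.add s h).length = s.length + 1 := by
        simp [PySem.Set.add, hm]
      have hmem : ∀ x, x ∈ PySem.Set.add s h ↔ x ∈ s ∨ x = h := by
        intro x; simp [PySem.Set.add, hm, List.mem_append]
      rw [show List.length s + (h :: t).length = (PySem.Set.add s h).length + t.length by
        simp only [hadd, List.length_cons]; omega]
      rw [ih (PySem.Set.add s h)]
      simp only [List.nodup_cons, List.mem_cons]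
      constructor
      · rintro ⟨hnd, hd⟩
        refine ⟨⟨fun hc => (hd h hc) ((hmem h).mpr (Or.inr rfl)), hnd⟩, ?_⟩
        rintro x (rfl | hx)
        · exact hm
        · exact fun hxs => hd x hx ((hmem x).mpr (Or.inl hxs))
      · rintro ⟨⟨hht, hnd⟩, hd⟩
        refine ⟨hnd, fun x hx hxa => ?_⟩
        rcases (hmem x).mp hxa with hxs | rfl
        · exact hd x (Or.inr hx) hxs
        · exact hht hx

-- ===== VERDICT (by name: the statement is the Claim_ definition above) =====
theorem is_EPO_spec : Claim_equal_is_EPO := by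
  intro triples _
  unfold Spec_is_EPO is_EPO is_EPO_alt
  rw [epoScan_eq]
  set P := triples.map (fun e => (e.1, e.2.1)) with hP
  simp only [PySem.Set.len, PySem.Set.empty]
  have hfold : triples.foldl (fun s e => PySem.Set.add s (e.1, e.2.1)) ([] : PySem.Set (Int × Int))
      = P.foldl (fun s x => PySem.Set.add s x) [] := by
    rw [hP, List.foldl_map]
  simp only [hfold]
  have hlen : P.length = triples.length := by simp [hP]
  have hiff := foldl_add_length P []
  simp only [List.length_nil, Nat.zero_add, List.not_mem_nil, not_false_iff,
    imp_true_iff, and_true] at hiff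
  by_cases hnd : P.Nodup
  · have h1 : (P.foldl (fun s x => PySem.Set.add s x) []).length = P.length := hiff.mpr hnd
    simp [h1, hlen, hnd]
  · have hne : (P.foldl (fun s x => PySem.Set.add s x) []).length ≠ P.length :=
      fun h => hnd (hiff.mp h)
    have hint : ¬(((P.foldl (fun s x => PySem.Set.add s x) []).length : Int)
        = (triples.length : Int)) := by omega
    simp [hint, hnd]
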